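-- pv_equiv track=rewrite | github.com/nvvijay/Foobar | Level 4/foobar4b.py | answer
-- ===== SOURCE A (Python) =====
-- import itertools
--
-- def answer(num_buns, num_required):
--     conf = [[] for x in range(num_buns)]
--     num_required = num_buns+1 - num_required
--     comb = list(itertools.combinations(range(num_buns), num_required))
--     for i, val in enumerate(comb):
--         for j in val:
--             conf[j].append(i)
--     return conf
-- ===== SOURCE B (Python) =====
-- import itertools
--
-- def answer(num_buns, num_required):
--     r = num_buns + 1 - num_required
--     comb = list(itertools.combinations(range(num_buns), r))
--     return [[i for i, c in enumerate(comb) if j in c] for j in range(num_buns)]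
-- ===== Notes on version B (the rewrite author's own statement) =====
-- stated objective: alternative
-- what changed: Instead of one scatter pass that appends each combination index into a preallocated table of per-bunny lists, B builds the answer per bunny: for each bunny j it filters the enumerated combination list for those containing j.
import Mathlib
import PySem

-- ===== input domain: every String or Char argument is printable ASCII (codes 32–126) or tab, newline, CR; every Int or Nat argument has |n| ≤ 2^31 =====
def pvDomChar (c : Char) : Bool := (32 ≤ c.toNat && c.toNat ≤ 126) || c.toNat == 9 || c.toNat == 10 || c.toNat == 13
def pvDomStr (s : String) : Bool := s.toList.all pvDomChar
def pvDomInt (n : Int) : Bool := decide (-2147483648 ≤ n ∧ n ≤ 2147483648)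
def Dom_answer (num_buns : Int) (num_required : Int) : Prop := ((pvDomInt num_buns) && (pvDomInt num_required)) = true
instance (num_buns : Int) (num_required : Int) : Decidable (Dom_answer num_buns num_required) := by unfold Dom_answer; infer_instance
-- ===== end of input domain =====

-- B builds the table per bunny (one filtering scan of the combination list per bunny)
-- instead of A's single scatter pass over all combinations; objective: alternative decomposition.

-- itertools.combinations(xs, k) in lexicographic order (shared helper: both Pythons call it)
def pvComb : List Int → Nat → List (List Int)
  | _, 0 => [[]]
  | [], _+1 => []
  | x :: rest, k+1 =>
    if rest.length < k then []   -- itertools: no combinations when r > len(pool); keeps evaluation proportional to the output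
    else (pvComb rest k).map (x :: ·) ++ pvComb rest (k+1)

-- ===== PORT A =====
def answer (num_buns : Int) (num_required : Int) : List (List Int) :=
  let conf := (PySem.List.pyRange 0 num_buns 1).map (fun _ => ([] : List Int))
  let r := num_buns + 1 - num_required
  let comb := pvComb (PySem.List.pyRange 0 num_buns 1) r.toNat
  -- conf[j].append(i): every j drawn from a combination of range(num_buns) is a valid
  -- nonnegative index, so List.modify at j.toNat is exact here
  (PySem.List.enumerate comb 0).foldl
    (fun cf p => p.2.foldl (fun cf2 j => cf2.modify j.toNat (fun row => row ++ [p.1])) cf) conf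

-- ===== PORT B =====
def answer_alt (num_buns : Int) (num_required : Int) : List (List Int) :=
  let r := num_buns + 1 - num_required
  let comb := pvComb (PySem.List.pyRange 0 num_buns 1) r.toNat
  (PySem.List.pyRange 0 num_buns 1).map (fun j =>
    ((PySem.List.enumerate comb 0).filter (fun p => p.2.contains j)).map (fun p => p.1))

-- ===== PRECONDITION & SPEC =====
-- Pre_ excludes exactly the inputs where num_buns+1-num_required < 0: there
-- itertools.combinations raises ValueError (in A and in B alike).
def Pre_answer (num_buns : Int) (num_required : Int) : Prop := 0 ≤ num_buns + 1 - num_required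
instance (num_buns : Int) (num_required : Int) : Decidable (Pre_answer num_buns num_required) := by unfold Pre_answer; infer_instance
def pvWitness_answer : Int × Int := (4, 4)
def Spec_answer (num_buns : Int) (num_required : Int) (out : List (List Int)) : Prop := out = answer_alt num_buns num_required
instance (num_buns : Int) (num_required : Int) (out : List (List Int)) : Decidable (Spec_answer num_buns num_required out) := by unfold Spec_answer; infer_instance

-- ===== CLAIM (what is proved, stated in full; the proofs are below) =====
def Claim_equal_answer : Prop := ∀ (num_buns : Int) (num_required : Int), Dom_answer num_buns num_required → Pre_answer num_buns num_required → Spec_answer num_buns num_required (answer num_buns num_required)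

-- ===== LEMMAS AND PROOFS =====

-- every combination is a sublist of the source list
lemma pvComb_sublist : ∀ (xs : List Int) (k : Nat), ∀ c ∈ pvComb xs k, c.Sublist xs := by
  intro xs
  induction xs with
  | nil =>
    intro k c hc
    cases k with
    | zero => simp [pvComb] at hc; simp [hc]
    | succ k => simp [pvComb] at hc
  | cons x rest ih =>
    intro k c hc
    cases k with
    | zero => simp [pvComb] at hc; simp [hc]
    | succ k =>
      rw [pvComb] at hc
      split_ifs at hc with hlen
      · simp at hc
      simp only [List.mem_append, List.mem_map] at hc
      rcases hc with ⟨c', hc', rfl⟩ | h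
      · exact (ih k c' hc').cons₂ x
      · exact (ih (k+1) c h).cons x

lemma mapIdx_id' (cf : List (List Int)) : List.mapIdx (fun _ row => row) cf = cf := by
  apply List.ext_getElem <;> simp

-- the inner scatter loop rewrites the table pointwise
lemma inner_loop (i : Int) : ∀ (c : List Int) (cf : List (List Int)),
    c.Nodup → (∀ j ∈ c, 0 ≤ j ∧ j < (cf.length : Int)) →
    (c.foldl (fun cf2 j => cf2.modify j.toNat (fun row => row ++ [i])) cf) =
      cf.mapIdx (fun t row => if c.contains (t : Int) then row ++ [i] else row) := by
  intro c
  induction c with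
  | nil => intro cf _ _; simp [mapIdx_id']
  | cons j c ih =>
    intro cf hnd hb
    have hjc : j ∉ c := (List.nodup_cons.mp hnd).1
    simp only [List.foldl_cons]
    rw [ih _ hnd.of_cons]
    · apply List.ext_getElem
      · simp
      · intro t h1 h2
        simp only [List.getElem_mapIdx, List.getElem_modify]
        have hj := hb j (by simp)
        by_cases ht : t = j.toNat
        · subst ht
          have hjt : ((j.toNat : Int)) = j := Int.toNat_of_nonneg hj.1
          rw [hjt]
          simp [hjc]
        · have hne : ((t : Int)) ≠ j := by
            intro he; exact ht (by omega)
          have h3 : j.toNat ≠ t := fun h => ht h.symm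
          simp [h3, hne]
    · intro j' hj'
      have := hb j' (by simp [hj'])
      simpa using this

-- the outer scatter pass equals per-index filtering of the enumerated list
lemma outer_loop : ∀ (ps : List (Int × List Int)) (cf : List (List Int)),
    (∀ p ∈ ps, p.2.Nodup ∧ ∀ j ∈ p.2, 0 ≤ j ∧ j < (cf.length : Int)) →
    ps.foldl (fun cf p => p.2.foldl (fun cf2 j => cf2.modify j.toNat (fun row => row ++ [p.1])) cf) cf =
      cf.mapIdx (fun t row => row ++ (ps.filter (fun p => p.2.contains (t:Int))).map (fun p => p.1)) := by
  intro ps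
  induction ps with
  | nil => intro cf _; simp [mapIdx_id']
  | cons p ps ih =>
    intro cf hb
    simp only [List.foldl_cons]
    rw [inner_loop p.1 p.2 cf (hb p (by simp)).1 (hb p (by simp)).2]
    rw [ih]
    · apply List.ext_getElem
      · simp
      · intro t h1 h2
        simp only [List.getElem_mapIdx, List.filter_cons]
        by_cases hc : ((t : Int)) ∈ p.2 <;> simp [hc]
    · intro q hq
      refine ⟨(hb q (by simp [hq])).1, fun j hj => ?_⟩
      have := (hb q (by simp [hq])).2 j hj
      simpa using this

lemma main_eq (R : List Int) (comb : List (List Int))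
    (hnd : R.Nodup) (hsub : ∀ c ∈ comb, c.Sublist R)
    (hR : ∀ (t : Nat) (ht : t < R.length), R[t] = (t : Int)) :
    (PySem.List.enumerate comb 0).foldl
        (fun cf p => p.2.foldl (fun cf2 j => cf2.modify j.toNat (fun row => row ++ [p.1])) cf)
        (R.map (fun _ => ([] : List Int))) =
      R.map (fun j => ((PySem.List.enumerate comb 0).filter (fun p => p.2.contains j)).map (fun p => p.1)) := by
  have hmem : ∀ p ∈ PySem.List.enumerate comb 0, p.2.Nodup ∧
      ∀ j ∈ p.2, 0 ≤ j ∧ j < ((R.map (fun _ => ([] : List Int))).length : Int) := by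
    intro p hp
    have hp2 : p.2 ∈ comb := by
      have := PySem.List.map_snd_enumerate comb (0 : Int)
      exact this ▸ List.mem_map_of_mem hp
    have hsb : p.2.Sublist R := hsub _ hp2
    refine ⟨hsb.nodup hnd, ?_⟩
    intro j hj
    have hjR : j ∈ R := hsb.subset hj
    obtain ⟨t, ht, rfl⟩ := List.mem_iff_getElem.mp hjR
    rw [hR t ht]
    simp only [List.length_map]
    omega
  rw [outer_loop _ _ hmem]
  apply List.ext_getElem
  · simp
  · intro t h1 h2
    have hlt : t < R.length := by simpa using h2
    simp only [List.getElem_mapIdx, List.getElem_map]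
    rw [hR t hlt]
    simp

theorem answer_eq (num_buns num_required : Int) :
    answer num_buns num_required = answer_alt num_buns num_required := by
  simp only [answer, answer_alt]
  apply main_eq
  · exact PySem.List.nodup_pyRange_one 0 num_buns
  · exact pvComb_sublist _ _
  · intro t ht
    have ht' : t < (num_buns - 0).toNat := by
      simpa [PySem.List.length_pyRange_one] using ht
    rw [PySem.List.getElem_pyRange_one 0 num_buns t]
    omega

-- ===== VERDICT (by name: the statement is the Claim_ definition above) =====
theorem answer_spec : Claim_equal_answer := by
  intro num_buns num_required _ _
  unfold Spec_answer
  exact answer_eq num_buns num_required
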